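-- pv_equiv track=rewrite | github.com/aleksiheikkila/leetCode | problems/check-if-binary-string-has-at-most-one-segment-of-one.py | checkOnesSegment_old
-- ===== SOURCE A (Python) =====
-- def checkOnesSegment_old(s: str) -> bool:
--     zeros_seen = False
--
--     for c in s[1:]:
--         if c == "1" and zeros_seen:
--             return False
--         elif c == "0":
--             zeros_seen = True
--
--     return True
-- ===== SOURCE B (Python) =====
-- def checkOnesSegment_old(s: str) -> bool:
--     # A single segment of ones means no '1' may appear after the first '0'.
--     tail = s[1:]
--     i = tail.find('0')
--     return i == -1 or '1' not in tail[i:]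
-- ===== Notes on version B (the rewrite author's own statement) =====
-- stated objective: faster
-- what changed: Replaces the stateful character-by-character Python loop with a flag by locating the first zero digit with str.find and one substring-membership test for a one digit after it, both C-level string primitives.
import Mathlib
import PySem

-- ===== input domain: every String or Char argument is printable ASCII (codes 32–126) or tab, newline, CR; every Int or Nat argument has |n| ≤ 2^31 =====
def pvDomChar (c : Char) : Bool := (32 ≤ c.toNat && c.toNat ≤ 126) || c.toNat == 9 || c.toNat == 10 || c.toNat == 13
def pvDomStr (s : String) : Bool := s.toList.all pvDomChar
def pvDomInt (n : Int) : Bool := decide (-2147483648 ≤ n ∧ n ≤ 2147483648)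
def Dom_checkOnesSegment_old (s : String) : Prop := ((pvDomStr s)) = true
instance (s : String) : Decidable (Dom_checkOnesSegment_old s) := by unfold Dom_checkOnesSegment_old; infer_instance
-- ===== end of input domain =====

-- B replaces A's stateful scan-with-flag by finding the first '0' and one
-- substring-membership test for a '1' after it (same cost; simpler decomposition).


-- ===== PORT A =====
-- the for-loop with early return and the zeros_seen flag
def pvLoopA : List Char → Bool → Bool
  | [], _ => true
  | c :: cs, zerosSeen =>
    if c = '1' ∧ zerosSeen then false
    else if c = '0' then pvLoopA cs true
    else pvLoopA cs zerosSeen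

def checkOnesSegment_old (s : String) : Bool :=
  pvLoopA (PySem.List.slice s.toList (some 1) none) false

-- ===== PORT B =====
def checkOnesSegment_old_alt (s : String) : Bool :=
  let tail := PySem.List.slice s.toList (some 1) none   -- s[1:]
  let i := PySem.Chars.find tail ['0']                  -- tail.find('0')
  i == -1 || !(PySem.Chars.isIn ['1'] (PySem.List.slice tail (some i) none))  -- '1' not in tail[i:]

-- ===== PRECONDITION & SPEC =====
def Spec_checkOnesSegment_old (s : String) (out : Bool) : Prop := out = checkOnesSegment_old_alt s
instance (s : String) (out : Bool) : Decidable (Spec_checkOnesSegment_old s out) := by unfold Spec_checkOnesSegment_old; infer_instance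

-- ===== CLAIM (what is proved, stated in full; the proofs are below) =====
def Claim_equal_checkOnesSegment_old : Prop := ∀ (s : String), Dom_checkOnesSegment_old s → Spec_checkOnesSegment_old s (checkOnesSegment_old s)

-- ===== LEMMAS AND PROOFS =====

-- with the flag already set, A's loop returns true iff no '1' remains
lemma pvLoopA_true (l : List Char) :
    pvLoopA l true = !(l.contains '1') := by
  induction l with
  | nil => rfl
  | cons c cs ih =>
    by_cases h1 : c = '1'
    · subst h1; simp [pvLoopA]
    · by_cases h0 : c = '0' <;> simp [pvLoopA, h0, h1, ih]
      exact fun _ h => h1 h.symm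

-- a zero-free prefix is skipped by A's loop with clear flag
lemma pvLoopA_skip (p q : List Char) (hp : '0' ∉ p) :
    pvLoopA (p ++ q) false = pvLoopA q false := by
  induction p with
  | nil => rfl
  | cons c cs ih =>
    have hc : c ≠ '0' := fun h => hp (h ▸ List.mem_cons_self)
    simp [pvLoopA, hc, ih (fun h => hp (List.mem_cons_of_mem _ h))]

-- a singleton is a substring iff it is a member
lemma pv_isIn_singleton (a : Char) (l : List Char) :
    PySem.Chars.isIn [a] l = l.contains a := by
  cases h : l.contains a with
  | true =>
    rw [PySem.Chars.isIn_iff_infix]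
    simp only [List.contains_eq_mem, decide_eq_true_eq] at h
    obtain ⟨p, q, rfl⟩ := List.append_of_mem h
    exact ⟨p, q, by simp⟩
  | false =>
    rw [PySem.Chars.isIn_eq_false_iff]
    intro hin
    have : a ∈ l := hin.sublist.subset (by simp)
    simp [List.contains_eq_mem, this] at h

-- ===== VERDICT (by name: the statement is the Claim_ definition above) =====
theorem checkOnesSegment_old_spec : Claim_equal_checkOnesSegment_old := by
  intro s _
  unfold Spec_checkOnesSegment_old checkOnesSegment_old checkOnesSegment_old_alt
  set t := PySem.List.slice s.toList (some 1) none with ht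
  simp only []
  by_cases hf : PySem.Chars.find t ['0'] = -1
  · -- no '0' in the tail: A's flag is never set, B short-circuits
    have hz : '0' ∉ t := by
      intro hm
      obtain ⟨p, q, heq⟩ := List.append_of_mem hm
      exact (PySem.Chars.find_eq_neg_one_iff t ['0']).mp hf ⟨p, q, by rw [heq]; simp⟩
    have := pvLoopA_skip t [] hz
    simp only [List.append_nil] at this
    simp [this, pvLoopA, hf]
  · -- first '0' at index n: split t there
    have hnn : 0 ≤ PySem.Chars.find t ['0'] :=
      (PySem.Chars.find_nonneg_iff t ['0']).mpr
        (by rcases (PySem.Chars.find_ne_neg_one_iff t ['0']).mp hf with h; exact h)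
    obtain ⟨hpre, hmin⟩ := PySem.Chars.find_spec hnn
    set n := (PySem.Chars.find t ['0']).toNat with hn
    obtain ⟨rest, hdrop⟩ : ∃ rest, t.drop n = '0' :: rest := by
      rcases hpre with ⟨q, hq⟩
      exact ⟨q, hq.symm⟩
    have hzp : '0' ∉ t.take n := by
      intro hm
      obtain ⟨j, hj, hget⟩ := List.mem_iff_getElem.mp hm
      have hjn : j < n := lt_of_lt_of_le hj (by simp)
      apply hmin j hjn
      have hle := PySem.Chars.find_le_length t ['0']
      have hni : (n : Int) = PySem.Chars.find t ['0'] := by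
        simp [hn, Int.toNat_of_nonneg hnn]
      have hjt : j < t.length := by omega
      have hteq : (List.take n t)[j] = t[j]'hjt := List.getElem_take
      have ht0 : t[j]'hjt = '0' := by rw [← hteq]; exact hget
      refine ⟨t.drop (j+1), ?_⟩
      rw [List.singleton_append, ← ht0, List.getElem_cons_drop]
    -- A's side
    have hA : pvLoopA t false = !(rest.contains '1') := by
      conv_lhs => rw [← List.take_append_drop n t]
      rw [pvLoopA_skip _ _ hzp, hdrop]
      simp [pvLoopA, pvLoopA_true]
    -- B's side
    have hslice : PySem.List.slice t (some (PySem.Chars.find t ['0'])) none = '0' :: rest := by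
      rw [PySem.List.slice_from t hnn, ← hn, hdrop]
    rw [hA, hslice]
    have hone : PySem.Chars.isIn ['1'] ('0' :: rest) = rest.contains '1' := by
      rw [pv_isIn_singleton]; simp [List.contains_eq_mem]
    simp [hf, hone]
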